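-- pv_equiv track=rewrite | github.com/spell-system/SPELL | spell/structures.py | levels_to_preds
-- ===== SOURCE A (Python) =====
-- def levels_to_preds(layout: list[int]) -> list[int]:
--     result = [0] * (len(layout) - 1)
--
--     stack = []
--     for i in range(len(layout)):
--         if stack:
--             while layout[stack[-1]] >= layout[i]:
--                 stack.pop()
--             result[i - 1] = stack[-1]
--         stack.append(i)
--     return result
-- ===== SOURCE B (Python) =====
-- def levels_to_preds(layout: list[int]) -> list[int]:
--     # For each i, the predecessor is simply the nearest previous index with a
--     # strictly smaller value = the largest index j < i with layout[j] < layout[i].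
--     return [max(j for j in range(i) if layout[j] < layout[i])
--             for i in range(1, len(layout))]
-- ===== Notes on version B (the rewrite author's own statement) =====
-- stated objective: simpler
-- what changed: Replaces the monotonic stack and in-place result array with a one-line comprehension that, for each position, takes the maximum earlier index holding a strictly smaller value.
import Mathlib
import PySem

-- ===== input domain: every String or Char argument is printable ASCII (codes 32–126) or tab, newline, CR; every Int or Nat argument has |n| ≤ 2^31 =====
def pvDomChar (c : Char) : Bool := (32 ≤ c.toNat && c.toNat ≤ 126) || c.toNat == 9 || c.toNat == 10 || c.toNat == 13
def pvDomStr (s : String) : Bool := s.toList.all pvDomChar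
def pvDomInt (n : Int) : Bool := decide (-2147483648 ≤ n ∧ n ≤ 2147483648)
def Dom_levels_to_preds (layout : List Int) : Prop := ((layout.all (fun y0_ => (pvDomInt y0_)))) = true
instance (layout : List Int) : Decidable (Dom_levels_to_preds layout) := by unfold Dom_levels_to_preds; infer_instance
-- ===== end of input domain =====

-- B is SIMPLER, not faster: a one-line nearest-smaller-index comprehension instead of A's monotonic stack.

-- ===== PORT A =====
-- 'while layout[stack[-1]] >= layout[i]: stack.pop()' — returns none when the stack
-- empties (Python's stack[-1] raises IndexError there; such inputs are outside Pre_).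
-- Stack entries and i are always in range(len(layout)), so getD is exact for them.
def popA (layout : List Int) (v : Int) : List Nat → Option (List Nat)
  | [] => none
  | t :: rest => if v ≤ layout.getD t 0 then popA layout v rest else some (t :: rest)

-- one iteration of A's for-loop; state none = an exception was raised
def stepA (layout : List Int) (st : Option (List Int × List Nat)) (i : Nat) :
    Option (List Int × List Nat) :=
  match st with
  | none => none
  | some (result, stack) =>
    match stack with
    | [] => some (result, [i])
    | _ :: _ =>
      match popA layout (layout.getD i 0) stack with
      | none => none
      | some stack' =>
        match stack' with
        | [] => none  -- unreachable: popA never returns some []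
        | t :: _ => some (result.set (i - 1) (t : Int), i :: stack')

def levels_to_preds (layout : List Int) : List Int :=
  match (List.range layout.length).foldl (stepA layout)
      (some (List.replicate (layout.length - 1) (0 : Int), [])) with
  | some (result, _) => result
  | none => []  -- exception path; excluded by Pre_

-- ===== PORT B =====
-- max(j for j in range(i) if layout[j] < layout[i]); Python's max raises ValueError
-- on an empty generator — the none branch is outside Pre_.
def bval (layout : List Int) (i : Nat) : Int :=
  match ((List.range i).filter (fun j => layout.getD j 0 < layout.getD i 0)).max? with
  | some m => (m : Int)
  | none => 0

def levels_to_preds_alt (layout : List Int) : List Int :=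
  (List.range' 1 (layout.length - 1)).map (bval layout)

-- ===== PRECONDITION & SPEC =====
-- Pre_ excludes exactly the inputs on which A raises IndexError (stack underflow):
-- those where some position has no strictly smaller earlier value, equivalently
-- where the first element is not strictly below every later element.  B raises ValueError there.
def Pre_levels_to_preds (layout : List Int) : Prop :=
  ∀ i ∈ List.range layout.length, 0 < i → layout.getD 0 0 < layout.getD i 0
instance (layout : List Int) : Decidable (Pre_levels_to_preds layout) := by
  unfold Pre_levels_to_preds; infer_instance
def pvWitness_levels_to_preds : List Int := [1, 3, 2, 5, 4]

def Spec_levels_to_preds (layout : List Int) (out : List Int) : Prop := out = levels_to_preds_alt layout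
instance (layout : List Int) (out : List Int) : Decidable (Spec_levels_to_preds layout out) := by unfold Spec_levels_to_preds; infer_instance

-- ===== CLAIM (what is proved, stated in full; the proofs are below) =====
def Claim_equal_levels_to_preds : Prop := ∀ (layout : List Int), Dom_levels_to_preds layout → Pre_levels_to_preds layout → Spec_levels_to_preds layout (levels_to_preds layout)

-- ===== LEMMAS AND PROOFS =====

-- loop invariant after processing indices 0..i-1 (for 1 ≤ i ≤ n):
-- result holds B's values on the filled prefix, and the stack is exactly the set of
-- indices j < i whose value is strictly below everything after them (top first).
def InvA (layout : List Int) (i : Nat) (st : List Int × List Nat) : Prop :=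
  st.1 = (List.range' 1 (i - 1)).map (bval layout)
           ++ List.replicate (layout.length - 1 - (i - 1)) 0
  ∧ st.2.Pairwise (· > ·)
  ∧ (∀ j, j ∈ st.2 ↔ (j < i ∧ ∀ k, j < k → k < i → layout.getD j 0 < layout.getD k 0))

theorem popA_spec (layout : List Int) (v : Int) (S : List Nat)
    (hex : ∃ x ∈ S, layout.getD x 0 < v) :
    popA layout v S = some (S.dropWhile (fun j => decide (v ≤ layout.getD j 0))) := by
  induction S with
  | nil => rcases hex with ⟨x, hx, _⟩; cases hx
  | cons t rest ih =>
    simp only [popA, List.dropWhile_cons, decide_eq_true_eq]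
    split_ifs with h
    · have hex' : ∃ x ∈ rest, layout.getD x 0 < v := by
        rcases hex with ⟨x, hx, hlt⟩
        rcases List.mem_cons.mp hx with rfl | hx'
        · omega
        · exact ⟨x, hx', hlt⟩
      exact ih hex'
    · rfl

theorem max?_eq_of (l : List Nat) (a : Nat) (ha : a ∈ l) (hub : ∀ x ∈ l, x ≤ a) :
    l.max? = some a := List.max?_eq_some_iff.mpr ⟨ha, hub⟩

theorem invA_step (layout : List Int) (i : Nat)
    (hpre : Pre_levels_to_preds layout)
    (hi1 : 1 ≤ i) (hin : i < layout.length) (st : List Int × List Nat)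
    (hinv : InvA layout i st) (hne : st.2 ≠ []) :
    ∃ st', stepA layout (some st) i = some st' ∧ InvA layout (i + 1) st' ∧ st'.2 ≠ [] := by
  obtain ⟨result, stack⟩ := st
  obtain ⟨hres, hpw, hmem⟩ := hinv
  simp only at hres hpw hmem hne
  set v := layout.getD i 0 with hv
  have h0mem : 0 ∈ stack := by
    refine (hmem 0).mpr ⟨by omega, fun k hk0 hki => ?_⟩
    exact hpre k (List.mem_range.mpr (by omega)) hk0
  have h0lt : layout.getD 0 0 < v := hpre i (List.mem_range.mpr hin) (by omega)
  have hpop := popA_spec layout v stack ⟨0, h0mem, h0lt⟩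
  set S' := stack.dropWhile (fun j => decide (v ≤ layout.getD j 0)) with hS'
  have hsplit := List.takeWhile_append_dropWhile (p := fun j => decide (v ≤ layout.getD j 0)) (l := stack)
  have hS'ne : S' ≠ [] := by
    intro hnil
    have h0tw : 0 ∈ stack.takeWhile (fun j => decide (v ≤ layout.getD j 0)) := by
      rw [← hsplit] at h0mem
      rcases List.mem_append.mp h0mem with h | h
      · exact h
      · rw [← hS'] at h; simp [hnil] at h
    have := List.mem_takeWhile_imp h0tw
    simp [-List.getD_eq_getElem?_getD] at this
    omega
  obtain ⟨t, rest, hTR⟩ := List.exists_cons_of_ne_nil hS'ne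
  have htS : t ∈ stack := (List.dropWhile_suffix _).subset (by rw [← hS', hTR]; simp)
  have ht_i : t < i := ((hmem t).mp htS).1
  have ht_lt : layout.getD t 0 < v := by
    have hhd := List.head?_dropWhile_not (p := fun j => decide (v ≤ layout.getD j 0)) (l := stack)
    rw [← hS', hTR] at hhd
    simp [-List.getD_eq_getElem?_getD] at hhd
    omega
  have hpopped : ∀ j ∈ stack, j ∉ (t :: rest) → v ≤ layout.getD j 0 := by
    intro j hj hjn
    rw [← hsplit] at hj
    rcases List.mem_append.mp hj with h | h
    · simpa using List.mem_takeWhile_imp h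
    · rw [← hS', hTR] at h; exact absurd h hjn
  have hTRsub : (t :: rest).Sublist stack := by
    rw [← hTR, hS']; exact (List.dropWhile_suffix _).sublist
  have hTRpw : (t :: rest).Pairwise (· > ·) := hpw.sublist hTRsub
  have hgt_popped : ∀ j ∈ stack, t < j → v ≤ layout.getD j 0 := by
    intro j hj hlt
    apply hpopped j hj
    intro hmem'
    rcases List.mem_cons.mp hmem' with rfl | hr
    · omega
    · have := (List.pairwise_cons.mp hTRpw).1 j hr; omega
  -- everything strictly between t and i has value ≥ v (downward induction)
  have habove : ∀ m j, i - j ≤ m → t < j → j < i → v ≤ layout.getD j 0 := by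
    intro m
    induction m with
    | zero => intro j h1 _ h3; omega
    | succ m ih =>
      intro j hm htj hji
      by_cases hjS : j ∈ stack
      · exact hgt_popped j hjS htj
      · have hnot : ¬ (j < i ∧ ∀ k, j < k → k < i → layout.getD j 0 < layout.getD k 0) :=
          fun h => hjS ((hmem j).mpr h)
        push Not at hnot
        obtain ⟨k, hjk, hki, hk⟩ := hnot hji
        have := ih k (by omega) (by omega) hki
        omega
  have hmax : ∀ j, j < i → layout.getD j 0 < v → j ≤ t := by
    intro j hji hjv
    by_contra hgt
    push Not at hgt
    have := habove (i - j) j le_rfl hgt hji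
    omega
  -- hence bval layout i = t
  have hbval : bval layout i = (t : Int) := by
    have hfilt : ((List.range i).filter (fun j => layout.getD j 0 < layout.getD i 0)).max?
        = some t := by
      apply max?_eq_of
      · simp only [List.mem_filter, List.mem_range]
        exact ⟨ht_i, by simp only [decide_eq_true_eq, ← hv]; exact ht_lt⟩
      · intro x hx
        simp only [List.mem_filter, List.mem_range, decide_eq_true_eq] at hx
        exact hmax x hx.1 (by omega)
    unfold bval
    rw [hfilt]
  refine ⟨(result.set (i - 1) (t : Int), i :: t :: rest), ?_, ⟨?_, ?_, ?_⟩, by simp⟩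
  · -- stepA computes this state
    obtain ⟨s0, stk, rfl⟩ := List.exists_cons_of_ne_nil hne
    simp only [stepA, ← hv, hpop, hTR]
  · -- result component
    simp only
    rw [hres]
    have hlen : ((List.range' 1 (i - 1)).map (bval layout)).length = i - 1 := by simp
    have hrep : layout.length - 1 - (i - 1) = (layout.length - 1 - i) + 1 := by omega
    rw [hrep, List.replicate_succ,
        List.set_append_right _ _ (by omega),
        hlen]
    have : i - 1 - (i - 1) = 0 := by omega
    rw [this, List.set_cons_zero]
    have hrange : List.range' 1 ((i - 1) + 1) = List.range' 1 (i - 1) ++ [1 + 1 * (i - 1)] :=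
      List.range'_concat
    have hi : (i + 1) - 1 = (i - 1) + 1 := by omega
    rw [hi, hrange, List.map_append]
    simp
    exact ⟨by rw [(by omega : 1 + (i - 1) = i)]; exact hbval.symm, by omega⟩
  · -- pairwise
    simp only
    refine List.pairwise_cons.mpr ⟨?_, hTRpw⟩
    intro j hj
    exact ((hmem j).mp (hTRsub.subset hj)).1
  · -- membership characterization at i+1
    simp only
    intro j
    constructor
    · intro hj
      rcases List.mem_cons.mp hj with rfl | hj'
      · exact ⟨by omega, fun k hk1 hk2 => by omega⟩
      · have hjS : j ∈ stack := hTRsub.subset hj'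
        obtain ⟨hji, hprop⟩ := (hmem j).mp hjS
        refine ⟨by omega, fun k hk1 hk2 => ?_⟩
        by_cases hk : k < i
        · exact hprop k hk1 hk
        · have hki : k = i := by omega
          subst hki
          rcases List.mem_cons.mp hj' with rfl | hr
          · exact ht_lt
          · have hjt : j < t := (List.pairwise_cons.mp hTRpw).1 j hr
            have := hprop t hjt ht_i
            omega
    · rintro ⟨hji1, hprop⟩
      by_cases hji : j = i
      · subst hji; exact List.mem_cons_self
      · have hji' : j < i := by omega
        have hjS : j ∈ stack := (hmem j).mpr ⟨hji', fun k hk1 hk2 => hprop k hk1 (by omega)⟩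
        have hjv : layout.getD j 0 < v := hprop i hji' (by omega)
        apply List.mem_cons_of_mem
        by_contra hnot
        have := hpopped j hjS hnot
        omega

theorem fold_inv (layout : List Int) (hpre : Pre_levels_to_preds layout)
    (m : Nat) : ∀ (i : Nat) (st : List Int × List Nat), 1 ≤ i → i + m = layout.length →
    InvA layout i st → st.2 ≠ [] →
    ∃ st', (List.range' i m).foldl (stepA layout) (some st) = some st' ∧
      InvA layout layout.length st' := by
  induction m with
  | zero =>
    intro i st _ hsum hinv _
    exact ⟨st, by simp, by rw [← hsum]; simpa using hinv⟩
  | succ m ih =>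
    intro i st hi1 hsum hinv hne
    obtain ⟨st', hstep, hinv', hne'⟩ :=
      invA_step layout i hpre hi1 (by omega) st hinv hne
    obtain ⟨st'', hfold, hinv''⟩ := ih (i + 1) st' (by omega) (by omega) hinv' hne'
    exact ⟨st'', by rw [List.range'_succ, List.foldl_cons, hstep, hfold], hinv''⟩

theorem levels_to_preds_spec : Claim_equal_levels_to_preds := by
  intro layout _ hpre
  unfold Spec_levels_to_preds levels_to_preds levels_to_preds_alt
  rcases hn : layout.length with _ | n
  · have hnil : layout = [] := List.eq_nil_of_length_eq_zero hn
    subst hnil; rfl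
  · -- n+1 ≥ 1: peel off i = 0, then apply fold_inv from i = 1
    have hrange : List.range (n + 1) = 0 :: List.range' 1 n := by
      rw [List.range_eq_range', List.range'_succ]
    have hstep0 : stepA layout (some (List.replicate ((n+1) - 1) (0 : Int), [])) 0
        = some (List.replicate ((n+1) - 1) (0 : Int), [0]) := by
      simp [stepA]
    have hinv1 : InvA layout 1 (List.replicate ((n+1) - 1) (0 : Int), [0]) := by
      refine ⟨by simp [hn], by simp, fun j => ?_⟩
      constructor
      · intro hj
        simp at hj
        exact ⟨by omega, fun k hk1 hk2 => by omega⟩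
      · rintro ⟨hj1, _⟩
        interval_cases j
        simp
    obtain ⟨st', hfold, hinv'⟩ :=
      fold_inv layout hpre n 1 (List.replicate ((n+1) - 1) (0 : Int), [0])
        le_rfl (by omega) hinv1 (by simp)
    rw [hrange, List.foldl_cons, hstep0, hfold]
    obtain ⟨result, stack⟩ := st'
    obtain ⟨hres, -, -⟩ := hinv'
    simp only at hres
    simp [hres, hn]
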